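-- pv_equiv track=rewrite | github.com/charliedmiller/coding_challenges | first_unique_character_in_string.py | freqs_and_1st_ocurrance
-- ===== SOURCE A (Python) =====
-- def freqs_and_1st_ocurrance(string):
--     first_ocurrance = {}
--     freqs = {}
--
--     for i,char in enumerate(string):
--         if char in freqs:
--             freqs[char] += 1
--         else:
--             freqs[char] = 1
--             first_ocurrance[char] = i
--
--     return freqs,first_ocurrance
-- ===== SOURCE B (Python) =====
-- from collections import Counter
--
-- def freqs_and_1st_ocurrance(string):
--     freqs = dict(Counter(string))
--     first_ocurrance = {}
--     for i, char in enumerate(string):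
--         if char not in first_ocurrance:
--             first_ocurrance[char] = i
--     return freqs, first_ocurrance
-- ===== Notes on version B (the rewrite author's own statement) =====
-- stated objective: idiomatic
-- what changed: A's single combined loop updating both dicts is replaced by two separate passes: collections.Counter builds the frequency dict in one step, then an independent enumerate pass records only first occurrences.
import Mathlib
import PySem

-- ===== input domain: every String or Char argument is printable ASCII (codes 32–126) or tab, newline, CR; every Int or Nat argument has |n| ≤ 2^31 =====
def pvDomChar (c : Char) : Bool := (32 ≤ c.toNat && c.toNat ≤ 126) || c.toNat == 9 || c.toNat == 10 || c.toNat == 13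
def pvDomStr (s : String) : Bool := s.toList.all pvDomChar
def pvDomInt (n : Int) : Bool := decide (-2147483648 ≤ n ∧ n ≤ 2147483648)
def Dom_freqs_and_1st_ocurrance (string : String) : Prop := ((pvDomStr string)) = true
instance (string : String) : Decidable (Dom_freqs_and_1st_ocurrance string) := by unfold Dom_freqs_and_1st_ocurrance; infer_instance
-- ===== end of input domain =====

-- B (idiomatic): A's single combined loop is split into Counter(string) for the frequencies
-- plus a separate first-occurrence pass; same return value.

-- ===== PORT A =====
-- single loop over enumerate(string), updating both dicts together (keys are the 1-char strings Python uses)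
def freqs_and_1st_ocurrance (string : String) : (List (String × Int)) × (List (String × Int)) :=
  let st := (PySem.List.enumerate string.toList 0).foldl
    (fun (st : PySem.Dict String Int × PySem.Dict String Int) ic =>
      let key := toString ic.2
      if st.1.contains key then
        (st.1.insert key (st.1.getD key 0 + 1), st.2)
      else
        (st.1.insert key 1, st.2.insert key ic.1))
    (PySem.Dict.empty, PySem.Dict.empty)
  (st.1.items, st.2.items)

-- ===== PORT B =====
-- freqs = dict(Counter(string)); then a second pass recording only first occurrences
def freqs_and_1st_ocurrance_alt (string : String) : (List (String × Int)) × (List (String × Int)) :=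
  let freqs := PySem.Dict.counter (string.toList.map (fun c => toString c))
  let first := (PySem.List.enumerate string.toList 0).foldl
    (fun (d : PySem.Dict String Int) ic =>
      if d.contains (toString ic.2) then d else d.insert (toString ic.2) ic.1)
    PySem.Dict.empty
  (freqs.items, first.items)

-- ===== PRECONDITION & SPEC =====
def Spec_freqs_and_1st_ocurrance (string : String) (out : (List (String × Int)) × (List (String × Int))) : Prop := out = freqs_and_1st_ocurrance_alt string
instance (string : String) (out : (List (String × Int)) × (List (String × Int))) : Decidable (Spec_freqs_and_1st_ocurrance string out) := by unfold Spec_freqs_and_1st_ocurrance; infer_instance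

-- ===== CLAIM (what is proved, stated in full; the proofs are below) =====
def Claim_equal_freqs_and_1st_ocurrance : Prop := ∀ (string : String), Dom_freqs_and_1st_ocurrance string → Spec_freqs_and_1st_ocurrance string (freqs_and_1st_ocurrance string)

-- ===== LEMMAS AND PROOFS =====

-- A's combined fold splits into the count fold and the first-occurrence fold, provided
-- the two accumulator dicts have the same key set (A tests membership in freqs, B in first).
theorem pv_split (l : List Char) (i : Int) (f fo : PySem.Dict String Int)
    (h : ∀ k, f.contains k = fo.contains k) :
    (PySem.List.enumerate l i).foldl
      (fun (st : PySem.Dict String Int × PySem.Dict String Int) ic =>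
        let key := toString ic.2
        if st.1.contains key then
          (st.1.insert key (st.1.getD key 0 + 1), st.2)
        else
          (st.1.insert key 1, st.2.insert key ic.1)) (f, fo)
    = (l.foldl (fun d c => d.insert (toString c) (d.getD (toString c) 0 + 1)) f,
       (PySem.List.enumerate l i).foldl
         (fun d ic => if d.contains (toString ic.2) then d else d.insert (toString ic.2) ic.1) fo) := by
  induction l generalizing i f fo with
  | nil => simp [PySem.List.enumerate_nil]
  | cons c l ih =>
    simp only [PySem.List.enumerate_cons, List.foldl_cons]
    by_cases hc : f.contains (toString c) = true
    · have hfo : fo.contains (toString c) = true := (h (toString c)) ▸ hc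
      simp only [hc, hfo, if_true]
      exact ih (i+1) _ _ (by
        intro k
        rw [PySem.Dict.contains_insert, h k]
        by_cases hk : k = toString c
        · subst hk; simp [hfo]
        · simp [hk])
    · have hf' : f.contains (toString c) = false := by simpa using hc
      have hfo' : fo.contains (toString c) = false := by rw [← h]; exact hf'
      simp only [hf', hfo', Bool.false_eq_true, if_false]
      have hg : f.getD (toString c) 0 = 0 :=
        PySem.Dict.getD_of_not_contains f 0 hf'
      have hins : f.insert (toString c) 1 = f.insert (toString c) (f.getD (toString c) 0 + 1) := by
        rw [hg]; norm_num
      rw [hins]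
      exact ih (i+1) _ _ (by
        intro k
        rw [PySem.Dict.contains_insert, PySem.Dict.contains_insert, h k])

theorem freqs_eq (string : String) :
    freqs_and_1st_ocurrance string = freqs_and_1st_ocurrance_alt string := by
  unfold freqs_and_1st_ocurrance freqs_and_1st_ocurrance_alt
  rw [pv_split string.toList 0 PySem.Dict.empty PySem.Dict.empty (fun k => rfl)]
  rw [← PySem.Dict.foldl_insert_getD_add_one_eq_counter, List.foldl_map]

-- ===== VERDICT (by name: the statement is the Claim_ definition above) =====
theorem freqs_and_1st_ocurrance_spec : Claim_equal_freqs_and_1st_ocurrance := by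
  intro s _
  exact (freqs_eq s).symm ▸ rfl
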